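-- pv_equiv track=rewrite | github.com/lcokun/road-damage-severity | src/data/build_bbox_crops.py | choose_bbox
-- ===== SOURCE A (Python) =====
-- SEVERITY_MAP = {
--     "D00": "minor",
--     "D01": "minor",
--     "D10": "minor",
--     "D11": "minor",
--     "D20": "severe",
--     "D40": "severe",
-- }
--
-- def choose_bbox(bboxes):
--     """
--     Choose bbox of highest severity present:
--       - if any severe label exists -> pick first severe bbox
--       - elif any minor label exists -> pick first minor bbox
--       - else -> None (normal/no objects)
--     """
--     # Tag each bbox with severity
--     tagged = []
--     for name, x1, y1, x2, y2 in bboxes: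
--         sev = SEVERITY_MAP.get(name, None)
--         tagged.append((sev, name, x1, y1, x2, y2))
--
--     for sev, name, x1, y1, x2, y2 in tagged:
--         if sev == "severe":
--             return (x1, y1, x2, y2)
--     for sev, name, x1, y1, x2, y2 in tagged:
--         if sev == "minor":
--             return (x1, y1, x2, y2)
--     return None
-- ===== SOURCE B (Python) =====
-- SEVERITY_MAP = {
--     "D00": "minor",
--     "D01": "minor",
--     "D10": "minor",
--     "D11": "minor",
--     "D20": "severe",
--     "D40": "severe",
-- }
--
-- def choose_bbox(bboxes):
--     # Severity-ranking fold: walk the list right-to-left keeping the best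
--     # (rank, coords) pair, where rank is 0 for severe, 1 for minor, 2 otherwise.
--     # Ties prefer the current (more-left) item, so the leftmost best-rank bbox wins.
--     best = (2, None)
--     for name, x1, y1, x2, y2 in reversed(list(bboxes)):
--         sev = SEVERITY_MAP.get(name)
--         r = 0 if sev == "severe" else 1 if sev == "minor" else 2
--         if r <= best[0] and r < 2:
--             best = (r, (x1, y1, x2, y2))
--     return best[1]
-- ===== Notes on version B (the rewrite author's own statement) =====
-- stated objective: alternative
-- what changed: Replaces A's tag-then-two-scans with a right-to-left fold over the list keeping a best (severity-rank, coords) accumulator, ties preferring the leftmost item.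
import Mathlib
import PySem

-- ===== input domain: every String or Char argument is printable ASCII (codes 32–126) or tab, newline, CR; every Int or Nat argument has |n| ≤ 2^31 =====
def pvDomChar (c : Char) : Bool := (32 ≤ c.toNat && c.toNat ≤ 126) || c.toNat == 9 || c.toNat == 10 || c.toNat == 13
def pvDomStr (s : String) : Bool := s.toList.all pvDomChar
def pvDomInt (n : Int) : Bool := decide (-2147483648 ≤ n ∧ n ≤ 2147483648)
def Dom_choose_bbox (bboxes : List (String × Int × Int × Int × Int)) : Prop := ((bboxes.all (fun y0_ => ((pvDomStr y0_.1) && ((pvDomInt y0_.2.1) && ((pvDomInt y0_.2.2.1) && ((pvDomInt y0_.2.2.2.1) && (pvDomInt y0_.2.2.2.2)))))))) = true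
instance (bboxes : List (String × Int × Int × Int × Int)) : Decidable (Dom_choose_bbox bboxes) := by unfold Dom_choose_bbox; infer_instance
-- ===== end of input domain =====

-- B replaces A's tag-then-two-scans by a single right-to-left fold keeping a best (rank, coords)
-- accumulator (0 = severe, 1 = minor, 2 = other; ties prefer the leftmost item); same O(n) cost.

-- ===== PORT A =====
def SEVERITY_MAP : PySem.Dict String String :=
  PySem.Dict.ofList [("D00", "minor"), ("D01", "minor"), ("D10", "minor"),
                     ("D11", "minor"), ("D20", "severe"), ("D40", "severe")]

-- first loop over tagged: return coords of first item tagged "severe"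
def chooseA_severe : List (Option String × Int × Int × Int × Int) → Option (Int × Int × Int × Int)
  | [] => none
  | (sev, x1, y1, x2, y2) :: rest =>
      if sev = some "severe" then some (x1, y1, x2, y2) else chooseA_severe rest

-- second loop over tagged: return coords of first item tagged "minor"
def chooseA_minor : List (Option String × Int × Int × Int × Int) → Option (Int × Int × Int × Int)
  | [] => none
  | (sev, x1, y1, x2, y2) :: rest =>
      if sev = some "minor" then some (x1, y1, x2, y2) else chooseA_minor rest

def choose_bbox (bboxes : List (String × Int × Int × Int × Int)) : Option (Int × Int × Int × Int) :=
  let tagged := bboxes.map (fun (p : String × Int × Int × Int × Int) =>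
    (SEVERITY_MAP.get? p.1, p.2.1, p.2.2.1, p.2.2.2.1, p.2.2.2.2))
  match chooseA_severe tagged with
  | some c => some c
  | none => chooseA_minor tagged

-- ===== PORT B =====
-- r = 0 if sev == "severe" else 1 if sev == "minor" else 2
def rankB (name : String) : Int :=
  let sev := SEVERITY_MAP.get? name
  if sev = some "severe" then 0 else if sev = some "minor" then 1 else 2

-- loop body: update best = (rank, coords) when the item ranks at least as well and is damaged
def stepB (best : Int × Option (Int × Int × Int × Int)) (p : String × Int × Int × Int × Int) :
    Int × Option (Int × Int × Int × Int) :=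
  let r := rankB p.1
  if r ≤ best.1 ∧ r < 2 then (r, some (p.2.1, p.2.2.1, p.2.2.2.1, p.2.2.2.2)) else best

-- the Python loop runs over reversed(list(bboxes)): a left fold over the reversed list
def choose_bbox_alt (bboxes : List (String × Int × Int × Int × Int)) : Option (Int × Int × Int × Int) :=
  (bboxes.reverse.foldl stepB ((2 : Int), none)).2

-- ===== PRECONDITION & SPEC =====
def Spec_choose_bbox (bboxes : List (String × Int × Int × Int × Int)) (out : Option (Int × Int × Int × Int)) : Prop := out = choose_bbox_alt bboxes
instance (bboxes : List (String × Int × Int × Int × Int)) (out : Option (Int × Int × Int × Int)) : Decidable (Spec_choose_bbox bboxes out) := by unfold Spec_choose_bbox; infer_instance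

-- ===== CLAIM (what is proved, stated in full; the proofs are below) =====
def Claim_equal_choose_bbox : Prop := ∀ (bboxes : List (String × Int × Int × Int × Int)), Dom_choose_bbox bboxes → Spec_choose_bbox bboxes (choose_bbox bboxes)

-- ===== LEMMAS AND PROOFS =====

-- tagging map used by both ports (proof helper)
def tagOf (t : List (String × Int × Int × Int × Int)) : List (Option String × Int × Int × Int × Int) :=
  t.map (fun p => (SEVERITY_MAP.get? p.1, p.2))

theorem choose_bbox_eq (t : List (String × Int × Int × Int × Int)) :
    choose_bbox t =
      match chooseA_severe (tagOf t) with
      | some c => some c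
      | none => chooseA_minor (tagOf t) := rfl

-- minimal severity rank present in the list
def minRankA (t : List (String × Int × Int × Int × Int)) : Int :=
  if chooseA_severe (tagOf t) = none then (if chooseA_minor (tagOf t) = none then 2 else 1) else 0

-- The fold computes (minimal rank, A's chosen bbox), by induction on the list.
theorem foldB_eq (bboxes : List (String × Int × Int × Int × Int)) :
    bboxes.reverse.foldl stepB ((2 : Int), none) = (minRankA bboxes, choose_bbox bboxes) := by
  rw [List.foldl_reverse]
  induction bboxes with
  | nil => simp [minRankA, tagOf, choose_bbox, chooseA_severe, chooseA_minor]
  | cons h t ih =>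
      obtain ⟨name, q⟩ := h
      rw [List.foldr_cons, ih]
      rw [choose_bbox_eq t, choose_bbox_eq ((name, q) :: t)]
      have htag : tagOf ((name, q) :: t) = (SEVERITY_MAP.get? name, q) :: tagOf t := rfl
      rw [htag]
      by_cases hs : SEVERITY_MAP.get? name = some "severe"
      · rcases hS : chooseA_severe (tagOf t) with _ | c <;>
          simp [stepB, rankB, minRankA, chooseA_severe, hs, hS, htag]; (split_ifs <;> simp_all)
      · by_cases hm : SEVERITY_MAP.get? name = some "minor"
        · rcases hS : chooseA_severe (tagOf t) with _ | c <;>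
            rcases hM : chooseA_minor (tagOf t) with _ | d <;>
            simp [stepB, rankB, minRankA, chooseA_severe, chooseA_minor, hm, hS, hM, htag]
        · rcases hS : chooseA_severe (tagOf t) with _ | c <;>
            rcases hM : chooseA_minor (tagOf t) with _ | d <;>
            simp [stepB, rankB, minRankA, chooseA_severe, chooseA_minor, hs, hm, hS, hM, htag]

-- ===== VERDICT (by name: the statement is the Claim_ definition above) =====
theorem choose_bbox_spec : Claim_equal_choose_bbox := by
  intro bboxes _
  unfold Spec_choose_bbox choose_bbox_alt
  rw [foldB_eq]
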